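-- pv_equiv track=rewrite | github.com/TitanStar73/MCBPixelArtGenerator | add_to_minecraft.py | WaveAnimation
-- ===== SOURCE A (Python) =====
-- def WaveAnimation(pixels):
--     for total in range(len(pixels) + len(pixels[0]) - 1):
--         out = []
--         for i in range(len(pixels)):
--             for j in range(len(pixels[0])):
--                 if i + j == total:
--                     out.append([i,j])
--
--         yield out
-- ===== SOURCE B (Python) =====
-- def WaveAnimation(pixels):
--     diags = {}
--     for i in range(len(pixels)):
--         for j in range(len(pixels[0])):
--             diags.setdefault(i + j, []).append([i, j])
--     for total in range(len(pixels) + len(pixels[0]) - 1):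
--         yield diags.get(total, [])
-- ===== Notes on version B (the rewrite author's own statement) =====
-- stated objective: faster
-- what changed: B makes one pass over the grid, appending each cell to a dict bucket keyed by i+j, then yields the buckets in diagonal order, instead of A's full m*n scan repeated for every diagonal.
import Mathlib
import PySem

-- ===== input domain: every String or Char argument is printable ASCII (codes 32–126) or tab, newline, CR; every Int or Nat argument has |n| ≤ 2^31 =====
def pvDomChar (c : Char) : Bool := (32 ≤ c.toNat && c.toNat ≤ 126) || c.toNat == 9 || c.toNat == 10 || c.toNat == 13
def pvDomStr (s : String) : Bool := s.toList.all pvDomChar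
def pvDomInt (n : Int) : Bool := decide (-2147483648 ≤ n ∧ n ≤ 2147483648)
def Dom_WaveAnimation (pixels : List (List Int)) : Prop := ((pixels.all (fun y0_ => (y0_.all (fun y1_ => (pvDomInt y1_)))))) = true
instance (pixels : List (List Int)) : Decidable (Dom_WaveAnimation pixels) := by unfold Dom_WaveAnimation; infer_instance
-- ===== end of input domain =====

-- B buckets every cell into a dict keyed by its anti-diagonal i+j in a single pass over the grid,
-- then reads the buckets off in diagonal order — asymptotically faster than A's per-diagonal full scan.
-- Both Pythons are generators; the equivalence is about the list of yielded values.

-- ===== PORT A =====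
def WaveAnimation (pixels : List (List Int)) : List (List (List Int)) :=
  let m : Int := pixels.length
  let n : Int := (pixels.headD []).length
  (PySem.List.pyRange 0 (m + n - 1) 1).map (fun total =>
    (PySem.List.pyRange 0 m 1).foldl (fun out i =>
      (PySem.List.pyRange 0 n 1).foldl (fun out j =>
        if i + j = total then out ++ [[i, j]] else out) out) [])

-- ===== PORT B =====
def WaveAnimation_alt (pixels : List (List Int)) : List (List (List Int)) :=
  let diags : PySem.Dict Int (List (List Int)) :=
    (PySem.List.pyRange 0 (pixels.length : Int) 1).foldl (fun d i =>
      (PySem.List.pyRange 0 ((pixels.headD []).length : Int) 1).foldl (fun d j =>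
        d.modify (i + j) [] (fun l => l ++ [[i, j]])) d) PySem.Dict.empty
  (PySem.List.pyRange 0 ((pixels.length : Int) + ((pixels.headD []).length : Int) - 1) 1).map
    (fun total => diags.getD total [])

-- ===== PRECONDITION & SPEC =====
-- Pre_ excludes only the empty grid, on which Python A raises IndexError at pixels[0] (so does B).
def Pre_WaveAnimation (pixels : List (List Int)) : Prop := pixels ≠ []
instance (pixels : List (List Int)) : Decidable (Pre_WaveAnimation pixels) := by unfold Pre_WaveAnimation; infer_instance
def pvWitness_WaveAnimation : List (List Int) := [[1, 2], [3, 4]]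

def Spec_WaveAnimation (pixels : List (List Int)) (out : List (List (List Int))) : Prop := out = WaveAnimation_alt pixels
instance (pixels : List (List Int)) (out : List (List (List Int))) : Decidable (Spec_WaveAnimation pixels out) := by unfold Spec_WaveAnimation; infer_instance

-- ===== CLAIM (what is proved, stated in full; the proofs are below) =====
def Claim_equal_WaveAnimation : Prop := ∀ (pixels : List (List Int)), Dom_WaveAnimation pixels → Pre_WaveAnimation pixels → Spec_WaveAnimation pixels (WaveAnimation pixels)

-- ===== LEMMAS AND PROOFS =====

-- A nested foldl over an outer list, where each outer element contributes the fold over g x,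
-- is the fold over the flattened list of contributions.
lemma foldl_foldl_eq_foldl_flatMap {α β δ : Type} (XS : List α) (g : α → List β)
    (f : δ → β → δ) (init : δ) :
    XS.foldl (fun d x => (g x).foldl f d) init = (XS.flatMap g).foldl f init := by
  induction XS generalizing init with
  | nil => rfl
  | cons x xs ih => simp [List.foldl_append, ih]

-- The flat list of (diagonal key, cell) pairs both loops traverse.
def pvCells (m n : Int) : List (Int × List Int) :=
  (PySem.List.pyRange 0 m 1).flatMap (fun i =>
    (PySem.List.pyRange 0 n 1).map (fun j => (i + j, [i, j])))

-- A's per-diagonal double loop keeps exactly the cells of that diagonal, in traversal order.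
lemma A_diag (m n total : Int) :
    (PySem.List.pyRange 0 m 1).foldl (fun out i =>
      (PySem.List.pyRange 0 n 1).foldl (fun out j =>
        if i + j = total then out ++ [[i, j]] else out) out) ([] : List (List Int))
    = ((pvCells m n).filter (fun p => decide (p.1 = total))).map (·.2) := by
  have h1 : ∀ (out : List (List Int)) (i : Int),
      (PySem.List.pyRange 0 n 1).foldl (fun out j =>
        if i + j = total then out ++ [[i, j]] else out) out
      = ((PySem.List.pyRange 0 n 1).map (fun j => ((i + j : Int), ([i, j] : List Int)))).foldl
          (fun out p => if p.1 = total then out ++ [p.2] else out) out := by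
    intro out i
    rw [List.foldl_map]
  simp only [h1]
  rw [foldl_foldl_eq_foldl_flatMap]
  rw [PySem.List.foldl_append_ite (fun p : Int × List Int => p.1 = total) (·.2)]
  rfl

-- B's double loop is the fold of the modify-step over the same flat list of pairs.
lemma B_dict (m n : Int) :
    (PySem.List.pyRange 0 m 1).foldl (fun d i =>
      (PySem.List.pyRange 0 n 1).foldl (fun d j =>
        d.modify (i + j) [] (fun l => l ++ [[i, j]])) d)
      (PySem.Dict.empty : PySem.Dict Int (List (List Int)))
    = (pvCells m n).foldl (fun d p => d.modify p.1 [] (fun l => l ++ [p.2])) PySem.Dict.empty := by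
  have h1 : ∀ (d : PySem.Dict Int (List (List Int))) (i : Int),
      (PySem.List.pyRange 0 n 1).foldl (fun d j =>
        d.modify (i + j) [] (fun l => l ++ [[i, j]])) d
      = ((PySem.List.pyRange 0 n 1).map (fun j => ((i + j : Int), ([i, j] : List Int)))).foldl
          (fun d p => d.modify p.1 [] (fun l => l ++ [p.2])) d := by
    intro d i
    rw [List.foldl_map]
  simp only [h1]
  rw [foldl_foldl_eq_foldl_flatMap]
  rfl

-- The two per-diagonal values agree (beq filter vs propositional filter).
lemma diag_eq (m n total : Int) :
    (PySem.List.pyRange 0 m 1).foldl (fun out i =>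
      (PySem.List.pyRange 0 n 1).foldl (fun out j =>
        if i + j = total then out ++ [[i, j]] else out) out) ([] : List (List Int))
    = ((PySem.List.pyRange 0 m 1).foldl (fun d i =>
        (PySem.List.pyRange 0 n 1).foldl (fun d j =>
          d.modify (i + j) [] (fun l => l ++ [[i, j]])) d)
        (PySem.Dict.empty : PySem.Dict Int (List (List Int)))).getD total [] := by
  rw [A_diag, B_dict, PySem.Dict.getD_foldl_modify_append]
  have : (fun p : Int × List Int => p.1 == total) = (fun p : Int × List Int => decide (p.1 = total)) := by
    funext p
    by_cases h : p.1 = total <;> simp [h]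
  rw [PySem.Dict.getD_empty, this, List.nil_append]

-- ===== VERDICT (by name: the statement is the Claim_ definition above) =====
theorem WaveAnimation_spec : Claim_equal_WaveAnimation := by
  intro pixels _ _
  show WaveAnimation pixels = WaveAnimation_alt pixels
  simp only [WaveAnimation, WaveAnimation_alt]
  apply List.map_congr_left
  intro total _
  exact diag_eq (pixels.length : Int) ((pixels.headD []).length : Int) total
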